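-- pv_equiv track=rewrite | github.com/MrBrantCode/unitest_baseline | mut_generate/mist_test_taco/taco_18492/solution.py | max_f_plus_g
-- ===== SOURCE A (Python) =====
-- def max_f_plus_g(L, R):
--     def base_2(x):
--         return bin(x)[2:]
--
--     def f_plus_g(x):
--         b = base_2(x)
--         k = len(b) - 1
--         c = b.count('0')
--         return c + 2 ** (k + 1) + 2 ** k - 1 - x
--
--     k = len(base_2(R)) - 1
--     if 2 ** k >= L:
--         return k + 2 ** (k + 1) - 1
--
--     x = L
--     mx = 0
--     while x <= R:
--         mx = max(mx, f_plus_g(x))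
--         i = (x ^ (x - 1)).bit_length() - 1
--         x += 2 ** i
--
--     return mx
-- ===== SOURCE B (Python) =====
-- def max_f_plus_g(L, R):
--     def base_2(x):
--         return bin(x)[2:]
--
--     def f_plus_g(x):
--         b = base_2(x)
--         k = len(b) - 1
--         c = b.count('0')
--         return c + 2 ** (k + 1) + 2 ** k - 1 - x
--
--     k = len(base_2(R)) - 1
--     if 2 ** k >= L:
--         return k + 2 ** (k + 1) - 1
--
--     # Candidates: L rounded up to a multiple of 2**i, one per bit position i.
--     mx = 0
--     for i in range(64):
--         p = 2 ** i
--         x = (L + p - 1) // p * p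
--         if x > R:
--             break
--         mx = max(mx, f_plus_g(x))
--     return mx
-- ===== Notes on version B (the rewrite author's own statement) =====
-- stated objective: alternative
-- what changed: The xor/bit_length lowest-set-bit chase (x += x & -x state update) is replaced by a bounded for-loop over bit positions i that recomputes each candidate directly as L rounded up to a multiple of 2**i with plain arithmetic ((L+p-1)//p*p), visiting the same candidate set; helpers and the analytic early-return branch are kept verbatim.
import Mathlib
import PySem

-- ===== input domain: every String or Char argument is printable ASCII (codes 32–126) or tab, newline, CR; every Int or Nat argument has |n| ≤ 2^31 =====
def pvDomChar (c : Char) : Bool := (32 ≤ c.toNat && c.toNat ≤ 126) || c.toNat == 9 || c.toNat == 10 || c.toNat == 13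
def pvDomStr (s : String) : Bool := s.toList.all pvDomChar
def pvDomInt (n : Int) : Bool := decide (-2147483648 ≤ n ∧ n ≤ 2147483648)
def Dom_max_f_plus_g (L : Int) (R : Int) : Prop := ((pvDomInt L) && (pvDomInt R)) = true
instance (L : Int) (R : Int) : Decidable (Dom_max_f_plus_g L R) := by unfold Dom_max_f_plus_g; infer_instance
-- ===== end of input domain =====

-- B replaces A's xor/bit_length lowest-set-bit skip loop by iterating over bit positions,
-- taking as candidate L rounded up to a multiple of 2**i (same candidate set, arithmetic only);
-- objective: alternative (same O(log) cost, no bit-trick state).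

-- ===== PORT A =====
-- base_2(x) = bin(x)[2:]   (Source B defines the identical helper; the ports share it)
def pyBase2 (x : Int) : List Char :=
  PySem.List.slice (PySem.Int.toBinChars0b x) (some 2) none

-- f_plus_g(x); len(b) ≥ 1 always (bin(x)[2:] is nonempty), so the Nat subtraction is exact;
-- b.count('0') with a one-character needle is exactly the character count.
def pyFPlusG (x : Int) : Int :=
  ((pyBase2 x).count '0' : Int)
    + 2 ^ ((pyBase2 x).length - 1 + 1) + 2 ^ ((pyBase2 x).length - 1) - 1 - x

-- A's while loop: x advances by 2**((x ^ (x-1)).bit_length() - 1), the lowest set bit of x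
def maxLoopA (R : Int) (x : Int) (mx : Int) : Int :=
  if h : x ≤ R then
    maxLoopA R (x + 2 ^ (PySem.Int.bitLength (PySem.Int.bxor x (x - 1)) - 1))
      (max mx (pyFPlusG x))
  else mx
termination_by (R + 1 - x).toNat
decreasing_by
  have hp := pow_pos (show (0:Int) < 2 by norm_num)
      (PySem.Int.bitLength (PySem.Int.bxor x (x - 1)) - 1)
  omega

def max_f_plus_g (L : Int) (R : Int) : Int :=
  if L ≤ 2 ^ ((pyBase2 R).length - 1) then
    (((pyBase2 R).length - 1 : Nat) : Int) + 2 ^ ((pyBase2 R).length - 1 + 1) - 1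
  else maxLoopA R L 0

-- ===== PORT B =====
-- B's for-loop over bit positions i = 0,…,63 with break; the candidate
-- x = (L + p - 1) // p * p  (p = 2**i) is L rounded up to a multiple of 2**i.
def maxLoopB (L : Int) (R : Int) (i : Nat) (mx : Int) : Int :=
  if i < 64 then
    if R < PySem.Int.floordiv (L + 2 ^ i - 1) (2 ^ i) * 2 ^ i then mx
    else maxLoopB L R (i + 1)
      (max mx (pyFPlusG (PySem.Int.floordiv (L + 2 ^ i - 1) (2 ^ i) * 2 ^ i)))
  else mx
termination_by 64 - i

def max_f_plus_g_alt (L : Int) (R : Int) : Int :=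
  if L ≤ 2 ^ ((pyBase2 R).length - 1) then
    (((pyBase2 R).length - 1 : Nat) : Int) + 2 ^ ((pyBase2 R).length - 1 + 1) - 1
  else maxLoopB L R 0 0

-- ===== PRECONDITION & SPEC =====
def Spec_max_f_plus_g (L : Int) (R : Int) (out : Int) : Prop := out = max_f_plus_g_alt L R
instance (L : Int) (R : Int) (out : Int) : Decidable (Spec_max_f_plus_g L R out) := by unfold Spec_max_f_plus_g; infer_instance

-- ===== CLAIM (what is proved, stated in full; the proofs are below) =====
def Claim_equal_max_f_plus_g : Prop := ∀ (L : Int) (R : Int), Dom_max_f_plus_g L R → Spec_max_f_plus_g L R (max_f_plus_g L R)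

-- ===== LEMMAS AND PROOFS =====

-- B's candidate: L rounded up to a multiple of 2^i
def ru (L : Int) (i : Nat) : Int :=
  PySem.Int.floordiv (L + 2 ^ i - 1) (2 ^ i) * 2 ^ i

lemma ru_lb (L : Int) (i : Nat) : L ≤ ru L i := by
  have hp : (0:Int) < 2 ^ i := pow_pos (by norm_num) i
  have h := (PySem.Int.floordiv_lt_iff_lt_mul (a := L + 2 ^ i - 1)
      (q := PySem.Int.floordiv (L + 2 ^ i - 1) (2 ^ i) + 1) hp).mp (by omega)
  unfold ru; nlinarith [h]

lemma ru_ub (L : Int) (i : Nat) : ru L i < L + 2 ^ i := by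
  have hp : (0:Int) < 2 ^ i := pow_pos (by norm_num) i
  have h := (PySem.Int.le_floordiv_iff_mul_le (a := L + 2 ^ i - 1)
      (q := PySem.Int.floordiv (L + 2 ^ i - 1) (2 ^ i)) hp).mp le_rfl
  unfold ru; omega

lemma ru_dvd (L : Int) (i : Nat) : (2 ^ i : Int) ∣ ru L i :=
  ⟨PySem.Int.floordiv (L + 2 ^ i - 1) (2 ^ i), mul_comm _ _⟩

lemma ru_eq_of (L x : Int) (i : Nat) (h1 : (2 ^ i : Int) ∣ x) (h2 : L ≤ x)
    (h3 : x < L + 2 ^ i) : ru L i = x := by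
  have hp : (0:Int) < 2 ^ i := pow_pos (by norm_num) i
  have hd : (2 ^ i : Int) ∣ (x - ru L i) := (Dvd.dvd.sub h1 (ru_dvd L i))
  have h4 := ru_lb L i
  have h5 := ru_ub L i
  have h0 : x - ru L i = 0 := Int.eq_zero_of_abs_lt_dvd hd (by
    rw [abs_lt]; omega)
  omega

lemma ru_zero (L : Int) : ru L 0 = L := by
  unfold ru
  rw [pow_zero, PySem.Int.floordiv_eq_ediv_of_pos (by norm_num)]
  simp

lemma xor2 (a b : Nat) (u v : Bool) :
    (2*a + u.toNat) ^^^ (2*b + v.toNat) = 2*(a ^^^ b) + (u != v).toNat := by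
  apply Nat.eq_of_testBit_eq
  intro j
  rw [Nat.testBit_xor]
  cases j with
  | zero =>
    simp [Nat.testBit_zero]
    rcases u <;> rcases v <;> simp
  | succ j =>
    have h1 : (2*a + u.toNat) / 2 = a := by rcases u <;> simp; omega
    have h2 : (2*b + v.toNat) / 2 = b := by rcases v <;> simp; omega
    have h3 : (2*(a ^^^ b) + (u != v).toNat) / 2 = a ^^^ b := by
      rcases u <;> rcases v <;> simp <;> omega
    rw [Nat.testBit_succ, Nat.testBit_succ, Nat.testBit_succ, h1, h2, h3, Nat.testBit_xor]

-- the heart of A's step: for x with lowest set bit 2^i, x ^ (x-1) = 2^(i+1) - 1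
lemma natXorPred : ∀ (i : Nat) (n : Nat), 0 < n → 2^i ∣ n → ¬ 2^(i+1) ∣ n →
    n ^^^ (n - 1) = 2^(i+1) - 1 := by
  intro i
  induction i with
  | zero =>
    intro n hn h1 h2
    have hodd : n % 2 = 1 := by omega
    obtain ⟨j, hj⟩ : ∃ j, n = 2*j + 1 := ⟨n/2, by omega⟩
    have e2 : n - 1 = 2*j + (false : Bool).toNat := by simp; omega
    have e1 : n = 2*j + (true : Bool).toNat := by simp; omega
    rw [e2, e1, xor2]
    simp
  | succ i ih =>
    intro n hn h1 h2
    obtain ⟨m, hm⟩ : ∃ m, n = 2*m := by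
      obtain ⟨c, hc⟩ := h1
      exact ⟨2^i * c, by rw [hc]; ring⟩
    have hm0 : 0 < m := by omega
    have hd1 : 2^i ∣ m := by
      obtain ⟨c, hc⟩ := h1
      have : 2*m = 2*(2^i*c) := by rw [← hm, hc]; ring
      exact ⟨c, by omega⟩
    have hd2 : ¬ 2^(i+1) ∣ m := by
      intro ⟨c, hc⟩
      exact h2 ⟨c, by rw [hm, hc]; ring⟩
    have hrec := ih m hm0 hd1 hd2
    have e2 : n - 1 = 2*(m-1) + (true : Bool).toNat := by simp; omega
    have e1 : n = 2*m + (false : Bool).toNat := by simp [hm]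
    rw [e2, e1, xor2, hrec]
    clear e1 e2
    have hp : 2^(i+1+1) = 2*2^(i+1) := by ring
    have hp2 : 1 ≤ 2^(i+1) := Nat.one_le_two_pow
    simp
    omega

-- A's computed increment exponent equals the lowest-set-bit position
lemma stepA (x : Int) (i : Nat) (hx : 1 ≤ x) (h1 : (2 ^ i : Int) ∣ x)
    (h2 : ¬ (2 ^ (i+1) : Int) ∣ x) :
    PySem.Int.bitLength (PySem.Int.bxor x (x - 1)) - 1 = i := by
  have hx0 : (0:Int) ≤ x := by omega
  have hx1 : (0:Int) ≤ x - 1 := by omega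
  rw [PySem.Int.bxor_of_nonneg hx0 hx1]
  have hn : x = ((x.toNat : Nat) : Int) := by omega
  have hsub : (x - 1).toNat = x.toNat - 1 := by omega
  have h1' : 2 ^ i ∣ x.toNat := by
    rw [hn] at h1
    exact_mod_cast h1
  have h2' : ¬ 2 ^ (i+1) ∣ x.toNat := by
    intro hc
    apply h2
    rw [hn]
    exact_mod_cast hc
  have hpos : 0 < x.toNat := by omega
  rw [hsub, natXorPred i x.toNat hpos h1' h2']
  -- bitLength (↑(2^(i+1) - 1)) = i + 1
  have ht : (2:Nat) ^ (i+1) - 1 ≠ 0 := by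
    have : 2 ≤ 2^(i+1) := by
      calc (2:Nat) = 2^1 := by norm_num
      _ ≤ 2^(i+1) := Nat.pow_le_pow_right (by norm_num) (by omega)
    omega
  set t : Nat := 2 ^ (i+1) - 1 with hts
  have htne : ((t : Int)) ≠ 0 := by exact_mod_cast ht
  have hlt := PySem.Int.lt_two_pow_bitLength ((t : Int))
  have hle := PySem.Int.two_pow_bitLength_le ((t : Int)) htne
  rw [Int.natAbs_natCast] at hlt hle
  set A := PySem.Int.bitLength ((t : Int)) with hA
  -- 2^(A-1) ≤ t < 2^A and t = 2^(i+1) - 1 force A = i + 1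
  have hA1 : 1 ≤ A := by
    by_contra hc
    have : A = 0 := by omega
    rw [this] at hlt
    simp at hlt
    omega
  have hub : A ≤ i + 1 := by
    by_contra hc
    have : 2 ^ (i+1) ≤ 2 ^ (A-1) := Nat.pow_le_pow_right (by norm_num) (by omega)
    omega
  have hlb : i + 1 ≤ A := by
    by_contra hc
    have : 2 ^ A ≤ 2 ^ i := Nat.pow_le_pow_right (by norm_num) (by omega)
    have h2i : 2 ^ i + 2 ^ i = 2 ^ (i+1) := by ring
    omega
  omega

-- simulation: from aligned states, A's chain and B's candidate scan return the same maximum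
lemma sim (L R : Int) (hL : 2 ≤ L) (hR : R ≤ 2147483648) :
    ∀ (n : Nat), ∀ (i : Nat), i + n = 64 → i ≤ 34 → ∀ (mx : Int),
      maxLoopA R (ru L i) mx = maxLoopB L R i mx := by
  intro n
  induction n with
  | zero =>
    intro i h1 h2 mx
    omega
  | succ n ih =>
    intro i hin hi mx
    have hi64 : i < 64 := by omega
    rw [maxLoopB, if_pos hi64]
    have hru : PySem.Int.floordiv (L + 2 ^ i - 1) (2 ^ i) * 2 ^ i = ru L i := rfl
    rw [hru]
    by_cases hxR : R < ru L i
    · rw [if_pos hxR, maxLoopA, dif_neg (by omega : ¬ ru L i ≤ R)]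
    · rw [if_neg hxR]
      have hxle : ru L i ≤ R := by omega
      have hp : (0:Int) < 2 ^ i := pow_pos (by norm_num) i
      have hlb := ru_lb L i
      have hub := ru_ub L i
      have hge : (2:Int) ^ i ≤ ru L i := Int.le_of_dvd (by omega) (ru_dvd L i)
      have hi31 : i ≤ 31 := by
        by_contra hc
        have h32 : (2:Int) ^ 32 ≤ 2 ^ i := pow_le_pow_right₀ (by norm_num) (by omega)
        norm_num at h32
        omega
      have hdbl : (2:Int) ^ (i+1) = 2 ^ i + 2 ^ i := by ring
      by_cases hdvd : (2 ^ (i+1) : Int) ∣ ru L i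
      · have hnext : ru L (i+1) = ru L i :=
          ru_eq_of L (ru L i) (i+1) hdvd hlb (by omega)
        have IH := ih (i+1) (by omega) (by omega) (max mx (pyFPlusG (ru L i)))
        rw [hnext] at IH
        rw [← IH]
        conv_lhs => rw [maxLoopA]
        conv_rhs => rw [maxLoopA]
        rw [dif_pos hxle, dif_pos hxle, max_assoc, max_self]
      · have hstep : PySem.Int.bitLength (PySem.Int.bxor (ru L i) (ru L i - 1)) - 1 = i :=
          stepA (ru L i) i (by omega) (ru_dvd L i) hdvd
        have hnext : ru L (i+1) = ru L i + 2 ^ i := by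
          apply ru_eq_of L (ru L i + 2 ^ i) (i+1) _ (by omega) (by omega)
          obtain ⟨m, hm⟩ := ru_dvd L i
          have hmodd : ¬ (2:Int) ∣ m := by
            intro ⟨c, hc⟩
            exact hdvd ⟨c, by rw [hm, hc]; ring⟩
          obtain ⟨c, hc⟩ : (2:Int) ∣ (m + 1) := by
            rcases Int.even_or_odd m with he | ho
            · exact absurd he.two_dvd hmodd
            · obtain ⟨c, hc⟩ := ho
              exact ⟨c + 1, by omega⟩
          exact ⟨c, by rw [hm]; linear_combination (2:Int) ^ i * hc⟩
        have IH := ih (i+1) (by omega) (by omega) (max mx (pyFPlusG (ru L i)))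
        rw [hnext] at IH
        rw [← IH, maxLoopA, dif_pos hxle, hstep]

-- ===== VERDICT (by name: the statement is the Claim_ definition above) =====
theorem max_f_plus_g_spec : Claim_equal_max_f_plus_g := by
  intro L R hD
  unfold Spec_max_f_plus_g max_f_plus_g max_f_plus_g_alt
  by_cases h : L ≤ (2:Int) ^ ((pyBase2 R).length - 1)
  · rw [if_pos h, if_pos h]
  · rw [if_neg h, if_neg h]
    have hpk : (0:Int) < 2 ^ ((pyBase2 R).length - 1) :=
      pow_pos (by norm_num) _
    have hL : 2 ≤ L := by omega
    have hR : R ≤ 2147483648 := by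
      unfold Dom_max_f_plus_g pvDomInt at hD
      simp [Bool.and_eq_true] at hD
      omega
    have := sim L R hL hR 64 0 rfl (by omega) 0
    rwa [ru_zero] at this
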